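-- pv_equiv track=rewrite | github.com/moshifa10/python-learning | challenge11.py | longest_open_path
-- ===== SOURCE A (Python) =====
-- def longest_open_path(numbers: list[int]) -> tuple[int, list[int]]:
--     indexes = []
--     streak = 0
--     path = {}
--     for i in range(len(numbers)):
--         # if str(numbers[i]).startswith("-"):
--         if numbers[i] < 0:
--             path[streak] = indexes
--             indexes = []
--             streak = 0
--
--         else:
--             streak += 1
--             indexes.append(numbers[i])
--
--     if streak > 0:
--         path[streak] = indexes
--     maximum = max(path.keys())
--     return (maximum, path[maximum])
-- ===== SOURCE B (Python) =====
-- def longest_open_path(numbers: list[int]) -> tuple[int, list[int]]: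
--     best: list[int] = []
--     cur: list[int] = []
--     for x in numbers:
--         if x < 0:
--             cur = []
--         else:
--             cur.append(x)
--             if len(best) <= len(cur):
--                 best = cur
--     return (len(best), best)
-- ===== Notes on version B (the rewrite author's own statement) =====
-- stated objective: simpler
-- what changed: A records every finished streak in a dict keyed by its length and afterwards takes max over the dict's keys; B keeps a single running 'best' segment updated in one pass (ties resolved towards the later run by >=), with no dict and no final max pass. Pre_ excludes only the empty list, on which A's max() raises ValueError.
import Mathlib
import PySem

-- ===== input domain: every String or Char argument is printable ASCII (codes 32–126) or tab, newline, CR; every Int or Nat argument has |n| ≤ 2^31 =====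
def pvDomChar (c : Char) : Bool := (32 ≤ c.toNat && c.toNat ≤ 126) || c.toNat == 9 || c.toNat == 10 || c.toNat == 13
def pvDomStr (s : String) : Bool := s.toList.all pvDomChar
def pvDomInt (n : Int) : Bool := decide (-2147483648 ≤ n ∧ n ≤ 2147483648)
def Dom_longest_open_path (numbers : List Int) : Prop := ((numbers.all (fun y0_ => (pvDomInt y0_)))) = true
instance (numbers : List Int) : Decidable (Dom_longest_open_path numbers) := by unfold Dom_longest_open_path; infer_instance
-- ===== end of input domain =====

-- B replaces A's streak-keyed dict + final max over keys by a single-pass running best (simpler);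
-- Pre_ excludes the empty list, where A's max() raises ValueError.


-- ===== PORT A =====
-- one body of A's loop: state (indexes, streak, path), element x = numbers[i]
def lopStepA (s : List Int × Int × PySem.Dict Int (List Int)) (x : Int) :
    List Int × Int × PySem.Dict Int (List Int) :=
  if x < 0 then ([], 0, s.2.2.insert s.2.1 s.1)
  else (s.1 ++ [x], s.2.1 + 1, s.2.2)

def longest_open_path (numbers : List Int) : Int × List Int :=
  let st := (PySem.List.pyRange 0 (PySem.List.len numbers) 1).foldl
      (fun s i => lopStepA s (PySem.List.pyGetD numbers i 0)) ([], 0, PySem.Dict.empty)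
  let path := if st.2.1 > 0 then st.2.2.insert st.2.1 st.1 else st.2.2
  match PySem.List.max? path.keys (fun k => k) with
  | some m => (m, path.getD m [])
  | none => (0, [])  -- max() of empty keys: Python raises ValueError here; excluded by Pre_

-- ===== PORT B =====
-- one body of B's loop: state (cur, best)
def lopStepB (s : List Int × List Int) (x : Int) : List Int × List Int :=
  if x < 0 then ([], s.2)
  else
    let cur := s.1 ++ [x]
    if s.2.length ≤ cur.length then (cur, cur) else (cur, s.2)

def longest_open_path_alt (numbers : List Int) : Int × List Int :=
  let st := numbers.foldl lopStepB ([], [])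
  ((st.2.length : Int), st.2)

-- ===== PRECONDITION & SPEC =====
-- Pre_ excludes only the empty list, on which A's max(path.keys()) raises ValueError.
def Pre_longest_open_path (numbers : List Int) : Prop := numbers ≠ []
instance (numbers : List Int) : Decidable (Pre_longest_open_path numbers) := by
  unfold Pre_longest_open_path; infer_instance

def pvWitness_longest_open_path : List Int := [1]

def Spec_longest_open_path (numbers : List Int) (out : Int × List Int) : Prop :=
  out = longest_open_path_alt numbers
instance (numbers : List Int) (out : Int × List Int) : Decidable (Spec_longest_open_path numbers out) := by
  unfold Spec_longest_open_path; infer_instance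

-- ===== CLAIM (what is proved, stated in full; the proofs are below) =====
def Claim_equal_longest_open_path : Prop := ∀ (numbers : List Int),
  Dom_longest_open_path numbers → Pre_longest_open_path numbers →
  Spec_longest_open_path numbers (longest_open_path numbers)

-- ===== LEMMAS AND PROOFS =====

-- the joint invariant of the two loops
def lopInv (sA : List Int × Int × PySem.Dict Int (List Int)) (sB : List Int × List Int) : Prop :=
  sB.1 = sA.1 ∧
  sA.2.1 = (sA.1.length : Int) ∧
  (∀ k v, sA.2.2.get? k = some v → (v.length : Int) = k) ∧
  ((sB.2 = sA.1 ∧ ∀ k ∈ sA.2.2.keys, k ≤ (sA.1.length : Int)) ∨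
   (sA.2.2.get? (sB.2.length : Int) = some sB.2 ∧ sA.1.length < sB.2.length ∧
    ∀ k ∈ sA.2.2.keys, k ≤ (sB.2.length : Int)))

-- A's state always has a nonempty dict or a nonempty current run after at least one step
def lopNE (sA : List Int × Int × PySem.Dict Int (List Int)) : Prop :=
  sA.2.2.keys ≠ [] ∨ sA.1 ≠ []

lemma lopStepA_NE (s : List Int × Int × PySem.Dict Int (List Int)) (x : Int) :
    lopNE (lopStepA s x) := by
  unfold lopNE lopStepA
  split
  · left
    intro h
    have : s.2.1 ∈ (s.2.2.insert s.2.1 s.1).keys := by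
      simp [PySem.Dict.mem_keys_insert]
    simp_all
  · right; simp

lemma lopNE_foldl (l : List Int) (s : List Int × Int × PySem.Dict Int (List Int))
    (h : lopNE s ∨ l ≠ []) : lopNE (l.foldl lopStepA s) := by
  induction l generalizing s with
  | nil => simpa using h.resolve_right (by simp)
  | cons y t ih =>
    simp only [List.foldl_cons]
    exact ih _ (Or.inl (lopStepA_NE s y))

lemma lopStep_inv (sA : List Int × Int × PySem.Dict Int (List Int)) (sB : List Int × List Int)
    (x : Int) (h : lopInv sA sB) : lopInv (lopStepA sA x) (lopStepB sB x) := by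
  obtain ⟨hc, hs, hv, hbr⟩ := h
  unfold lopStepA lopStepB
  by_cases hx : x < 0
  · simp only [if_pos hx]
    refine ⟨rfl, by simp, ?_, ?_⟩
    · intro k v hk
      rw [PySem.Dict.get?_insert] at hk
      split at hk
      · cases hk; omega
      · exact hv _ _ hk
    · rcases hbr with ⟨hbe, hkeys⟩ | ⟨hget, hlt, hkeys⟩
      · -- best is the current run
        by_cases hnil : sA.1 = []
        · left
          refine ⟨by simp [hbe, hnil], ?_⟩
          intro k hk
          rcases (PySem.Dict.mem_keys_insert _ _ _ _).1 hk with h1 | h1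
          · subst h1; simp [hs, hnil]
          · have := hkeys _ h1; simp [hnil] at this ⊢; omega
        · right
          have hlen : 0 < sA.1.length := List.length_pos_iff.2 hnil
          refine ⟨?_, by show (0 : Nat) < sB.2.length; rw [hbe]; exact hlen, ?_⟩
          · rw [hbe, hs]
            exact PySem.Dict.get?_insert_self _ _ _
          · intro k hk
            rcases (PySem.Dict.mem_keys_insert _ _ _ _).1 hk with h1 | h1
            · subst h1; simp [hs, hbe]
            · have := hkeys _ h1; simp [hbe]; omega
      · right
        refine ⟨?_, lt_of_le_of_lt (Nat.zero_le _) hlt, ?_⟩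
        · rw [PySem.Dict.get?_insert_of_ne _ _
            (by show (sB.2.length : Int) ≠ sA.2.1; omega)]
          exact hget
        · intro k hk
          rcases (PySem.Dict.mem_keys_insert _ _ _ _).1 hk with h1 | h1
          · subst h1
            show sA.2.1 ≤ (sB.2.length : Int)
            omega
          · exact hkeys _ h1
  · simp only [if_neg hx]
    rcases hbr with ⟨hbe, hkeys⟩ | ⟨hget, hlt, hkeys⟩
    · -- best was the current run; it stays ahead, so the update fires
      have hcond : sB.2.length ≤ (sB.1 ++ [x]).length := by simp [hc, hbe]
      rw [if_pos hcond]
      refine ⟨by simp [hc], by simp [hs], hv, Or.inl ⟨by simp [hc], ?_⟩⟩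
      intro k hk
      have := hkeys _ hk
      simp; omega
    · by_cases heq : (sB.1 ++ [x]).length = sB.2.length
      · -- tie reached: best becomes the current run
        rw [if_pos (le_of_eq heq.symm)]
        refine ⟨by simp [hc], by simp [hs], hv, Or.inl ⟨by simp [hc], ?_⟩⟩
        intro k hk
        have := hkeys _ hk
        simp [hc] at heq ⊢
        omega
      · -- best stays strictly ahead
        have hlen : (sB.1 ++ [x]).length = sA.1.length + 1 := by simp [hc]
        have hcond : ¬ sB.2.length ≤ (sB.1 ++ [x]).length := by omega
        rw [if_neg hcond]
        refine ⟨by simp [hc], by simp [hs], hv, Or.inr ⟨hget, ?_, hkeys⟩⟩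
        show (sA.1 ++ [x]).length < sB.2.length
        simp
        omega

lemma lopInv_foldl (l : List Int) (sA : List Int × Int × PySem.Dict Int (List Int))
    (sB : List Int × List Int) (h : lopInv sA sB) :
    lopInv (l.foldl lopStepA sA) (l.foldl lopStepB sB) := by
  induction l generalizing sA sB with
  | nil => exact h
  | cons y t ih => exact ih _ _ (lopStep_inv _ _ y h)

-- finalisation: from related states, A's dict+max extraction equals (len best, best)
lemma lop_finalize (sA : List Int × Int × PySem.Dict Int (List Int)) (sB : List Int × List Int)
    (hinv : lopInv sA sB) (hne : lopNE sA) :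
    (let path := if sA.2.1 > 0 then sA.2.2.insert sA.2.1 sA.1 else sA.2.2
     match PySem.List.max? path.keys (fun k => k) with
     | some m => (m, path.getD m [])
     | none => ((0 : Int), ([] : List Int))) = ((sB.2.length : Int), sB.2) := by
  obtain ⟨hc, hs, hv, hbr⟩ := hinv
  by_cases hnil : sA.1 = []
  · -- streak = 0: no final insert
    have hs0 : ¬ sA.2.1 > 0 := by simp [hs, hnil]
    simp only [hs0, if_false]
    -- best facts
    rcases hbr with ⟨hbe, hkeys⟩ | ⟨hget, hlt, hkeys⟩
    · -- best = [] ; all keys are ≤ 0, hence = 0 with value []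
      have hk0 : ∀ k ∈ sA.2.2.keys, k = 0 := by
        intro k hk
        have h1 := hkeys _ hk
        have h2 : sA.2.2.get? k ≠ none := by
          simp [PySem.Dict.get?_eq_none_iff_not_mem_keys, hk]
        obtain ⟨v, hvk⟩ := Option.ne_none_iff_exists'.1 h2
        have := hv _ _ hvk
        simp [hnil] at h1; omega
      have hkne : sA.2.2.keys ≠ [] := by
        rcases hne with h | h
        · exact h
        · exact absurd hnil h
      have hsome : PySem.List.max? (sA.2.2.keys) (fun k : Int => k) ≠ none := by
        simp only [ne_eq, PySem.List.max?_eq_none_iff]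
        exact hkne
      obtain ⟨m, hm⟩ := Option.ne_none_iff_exists'.1 hsome
      have hmem := PySem.List.max?_mem hm
      have hm0 : m = 0 := hk0 _ hmem
      have hgm : sA.2.2.get? m = some [] := by
        have h2 : sA.2.2.get? m ≠ none := by
          simp [PySem.Dict.get?_eq_none_iff_not_mem_keys, hmem]
        obtain ⟨v, hvk⟩ := Option.ne_none_iff_exists'.1 h2
        have := hv _ _ hvk
        have : v = [] := by
          have : v.length = 0 := by omega
          simpa [List.length_eq_zero_iff] using this
        simp_all
      subst hm0
      simp [hm, hbe, hnil, PySem.Dict.getD_of_get?_eq_some _ _ hgm]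
    · -- best stored in the dict at key len best, keys ≤ len best
      have hbl : ((sB.2.length : Int)) ∈ sA.2.2.keys := by
        by_contra h
        have := (PySem.Dict.get?_eq_none_iff_not_mem_keys _ _).2 h
        simp [hget] at this
      have hsome : PySem.List.max? (sA.2.2.keys) (fun k : Int => k) ≠ none := by
        simp only [ne_eq, PySem.List.max?_eq_none_iff]
        exact (List.ne_nil_of_mem hbl)
      obtain ⟨m, hm⟩ := Option.ne_none_iff_exists'.1 hsome
      have hmax := PySem.List.max?_isMax hm
      have hmem := PySem.List.max?_mem hm
      have h1 : m ≤ (sB.2.length : Int) := hkeys _ hmem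
      have h2 : (sB.2.length : Int) ≤ m := hmax _ hbl
      have hme : m = (sB.2.length : Int) := le_antisymm h1 h2
      simp [hm, hme, PySem.Dict.getD_of_get?_eq_some _ _ hget]
  · -- streak > 0: final insert of the current run
    have hlen : 0 < sA.1.length := List.length_pos_iff.2 hnil
    have hs0 : sA.2.1 > 0 := by omega
    simp only [hs0, if_true]
    rcases hbr with ⟨hbe, hkeys⟩ | ⟨hget, hlt, hkeys⟩
    · -- best = current run; inserted key len sA.1 is the maximum
      have hbl : sA.2.1 ∈ (sA.2.2.insert sA.2.1 sA.1).keys := by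
        simp [PySem.Dict.mem_keys_insert]
      have hsome : PySem.List.max? ((sA.2.2.insert sA.2.1 sA.1).keys) (fun k : Int => k) ≠ none := by
        simp only [ne_eq, PySem.List.max?_eq_none_iff]
        exact (List.ne_nil_of_mem hbl)
      obtain ⟨m, hm⟩ := Option.ne_none_iff_exists'.1 hsome
      have hmax := PySem.List.max?_isMax hm
      have hmem := PySem.List.max?_mem hm
      have h1 : m ≤ sA.2.1 := by
        rcases (PySem.Dict.mem_keys_insert _ _ _ _).1 hmem with h | h
        · omega
        · have := hkeys _ h; omega
      have hme : m = sA.2.1 := le_antisymm h1 (hmax _ hbl)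
      have hgm : (sA.2.2.insert sA.2.1 sA.1).get? sA.2.1 = some sA.1 :=
        PySem.Dict.get?_insert_self _ _ _
      rw [hs] at hm hme hgm
      simp [hm, hme, PySem.Dict.getD_of_get?_eq_some _ _ hgm, hbe, hs]
    · -- best stored earlier with len best > len current; it stays the maximum
      have hne2 : (sB.2.length : Int) ≠ sA.2.1 := by omega
      have hget' : (sA.2.2.insert sA.2.1 sA.1).get? (sB.2.length : Int) = some sB.2 := by
        rw [PySem.Dict.get?_insert_of_ne _ _ hne2]; exact hget
      have hbl : ((sB.2.length : Int)) ∈ (sA.2.2.insert sA.2.1 sA.1).keys := by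
        by_contra h
        have := (PySem.Dict.get?_eq_none_iff_not_mem_keys _ _).2 h
        simp [hget'] at this
      have hsome : PySem.List.max? ((sA.2.2.insert sA.2.1 sA.1).keys) (fun k : Int => k) ≠ none := by
        simp only [ne_eq, PySem.List.max?_eq_none_iff]
        exact (List.ne_nil_of_mem hbl)
      obtain ⟨m, hm⟩ := Option.ne_none_iff_exists'.1 hsome
      have hmax := PySem.List.max?_isMax hm
      have hmem := PySem.List.max?_mem hm
      have h1 : m ≤ (sB.2.length : Int) := by
        rcases (PySem.Dict.mem_keys_insert _ _ _ _).1 hmem with h | h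
        · omega
        · exact hkeys _ h
      have hme : m = (sB.2.length : Int) := le_antisymm h1 (hmax _ hbl)
      rw [hs] at hm hget'
      simp [hm, hme, PySem.Dict.getD_of_get?_eq_some _ _ hget', hs]

-- ===== VERDICT (by name: the statement is the Claim_ definition above) =====
theorem longest_open_path_spec : Claim_equal_longest_open_path := by
  intro numbers _ hpre
  unfold Spec_longest_open_path longest_open_path longest_open_path_alt
  have hfold := PySem.List.foldl_pyRange_pyGetD numbers 0 lopStepA
    ([], 0, PySem.Dict.empty) (a := 0) (by omega)
  rw [hfold]
  simp only [Int.toNat_zero, List.drop_zero]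
  have hinv : lopInv (numbers.foldl lopStepA ([], 0, PySem.Dict.empty))
      (numbers.foldl lopStepB ([], [])) := by
    apply lopInv_foldl
    refine ⟨rfl, by simp, by simp [PySem.Dict.get?_empty], Or.inl ⟨rfl, by simp⟩⟩
  have hne : lopNE (numbers.foldl lopStepA ([], 0, PySem.Dict.empty)) :=
    lopNE_foldl _ _ (Or.inr hpre)
  exact lop_finalize _ _ hinv hne
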